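-- pv_equiv track=rewrite | github.com/studdcat/Python | python_test/test_004.py | solution
-- ===== SOURCE A (Python) =====
-- def solution(answers):
--     answer = []
--     p1 = [1,2,3,4,5]
--     p2 = [2,1,2,3,2,4,2,5]
--     p3 = [3,3,1,1,2,2,4,4,5,5]
--     scores = [0, 0, 0]
--
--     for idx, ans in enumerate(answers):
--
--         if ans == p1[idx % len(p1)]:
--             scores[0] += 1
--
--         if ans == p2[idx % len(p2)]:
--             scores[1] += 1
--
--         if ans == p3[idx % len(p3)]:
--             scores[2] += 1
--
--     for idx, x in enumerate(scores):
--
--         if x == max(scores):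
--             answer.append(idx + 1)
--
--     return answer
-- ===== SOURCE B (Python) =====
-- def solution(answers):
--     # Bucket-counting: one pass builds a histogram of (position mod 40, answer);
--     # since 40 = lcm(5, 8, 10), each pattern's score is a fixed 40-term table sum.
--     hist = {}
--     for i, a in enumerate(answers):
--         key = (i % 40, a)
--         hist[key] = hist.get(key, 0) + 1
--     patterns = [[1, 2, 3, 4, 5],
--                 [2, 1, 2, 3, 2, 4, 2, 5],
--                 [3, 3, 1, 1, 2, 2, 4, 4, 5, 5]]
--     scores = [sum(hist.get((r, p[r % len(p)]), 0) for r in range(40))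
--               for p in patterns]
--     m = max(scores)
--     return [i + 1 for i, s in enumerate(scores) if s == m]
-- ===== Notes on version B (the rewrite author's own statement) =====
-- stated objective: alternative
-- what changed: A scans the answers checking all three cyclic patterns per element and mutates a scores list; B instead builds a histogram of (index mod 40, answer) in one pass (40 = lcm of the pattern lengths) and then computes each pattern's score as a fixed 40-term table sum over the histogram, so the pattern lookups never touch the answers list.
import Mathlib
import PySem

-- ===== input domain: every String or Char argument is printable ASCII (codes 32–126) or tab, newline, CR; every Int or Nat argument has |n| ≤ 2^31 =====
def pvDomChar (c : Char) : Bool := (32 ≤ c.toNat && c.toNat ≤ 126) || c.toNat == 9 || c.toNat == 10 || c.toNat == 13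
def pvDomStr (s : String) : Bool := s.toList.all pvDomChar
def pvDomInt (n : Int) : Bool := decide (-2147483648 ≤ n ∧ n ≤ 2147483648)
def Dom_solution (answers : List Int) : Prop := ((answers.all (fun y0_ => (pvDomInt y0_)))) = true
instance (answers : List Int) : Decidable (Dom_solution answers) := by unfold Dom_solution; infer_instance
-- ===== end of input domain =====

-- B replaces A's three-patterns-per-element scan with a one-pass histogram of
-- (index mod 40, answer) (40 = lcm of the pattern lengths); each score is then a
-- fixed 40-term table sum over the histogram (alternative algorithm, same cost).


-- ===== PORT A =====
-- literal port of A: one fold over enumerate(answers) updating the (s1,s2,s3) state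
-- (Python's scores list of length 3), then a fold over enumerate(scores) appending idx+1
-- when the entry equals max(scores).  The indices idx % len(p) are always in range, so
-- pyGetD is exact here (it never returns its default).
def solution (answers : List Int) : List Int :=
  let p1 : List Int := [1, 2, 3, 4, 5]
  let p2 : List Int := [2, 1, 2, 3, 2, 4, 2, 5]
  let p3 : List Int := [3, 3, 1, 1, 2, 2, 4, 4, 5, 5]
  let scores :=
    (PySem.List.enumerate answers 0).foldl
      (fun (s : Int × Int × Int) ia =>
        let s := if ia.2 = PySem.List.pyGetD p1 (PySem.Int.mod ia.1 5) 0 then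
                   (s.1 + 1, s.2.1, s.2.2) else s
        let s := if ia.2 = PySem.List.pyGetD p2 (PySem.Int.mod ia.1 8) 0 then
                   (s.1, s.2.1 + 1, s.2.2) else s
        if ia.2 = PySem.List.pyGetD p3 (PySem.Int.mod ia.1 10) 0 then
          (s.1, s.2.1, s.2.2 + 1) else s)
      (0, 0, 0)
  let scoresL : List Int := [scores.1, scores.2.1, scores.2.2]
  (PySem.List.enumerate scoresL 0).foldl
    (fun acc ix =>
      if some ix.2 = PySem.List.max? scoresL (fun x => x) then acc ++ [ix.1 + 1] else acc)
    []

-- ===== PORT B =====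
-- literal port of B: one pass builds hist[(i % 40, a)] += 1 (dict via get-default + insert,
-- exactly Source B's 'hist[key] = hist.get(key, 0) + 1'); each score is the sum over
-- r in range(40) of hist.get((r, p[r % len(p)]), 0); winners via a comprehension.
def solution_alt (answers : List Int) : List Int :=
  let hist : PySem.Dict (Int × Int) Int :=
    (PySem.List.enumerate answers 0).foldl
      (fun d ia =>
        let key := (PySem.Int.mod ia.1 40, ia.2)
        d.insert key (d.getD key 0 + 1))
      PySem.Dict.empty
  let patterns : List (List Int) :=
    [[1, 2, 3, 4, 5], [2, 1, 2, 3, 2, 4, 2, 5], [3, 3, 1, 1, 2, 2, 4, 4, 5, 5]]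
  let scores : List Int :=
    patterns.map (fun p =>
      ((PySem.List.pyRange 0 40 1).map
        (fun r => hist.getD (r, PySem.List.pyGetD p (PySem.Int.mod r (p.length : Int)) 0) 0)).sum)
  let m : Int := (PySem.List.max? scores (fun x => x)).getD 0   -- scores is nonempty
  (PySem.List.enumerate scores 0).filterMap
    (fun ix => if ix.2 = m then some (ix.1 + 1) else none)

-- ===== PRECONDITION & SPEC =====
def Spec_solution (answers : List Int) (out : List Int) : Prop := out = solution_alt answers
instance (answers : List Int) (out : List Int) : Decidable (Spec_solution answers out) := by unfold Spec_solution; infer_instance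

-- ===== CLAIM (what is proved, stated in full; the proofs are below) =====
def Claim_equal_solution : Prop := ∀ (answers : List Int), Dom_solution answers → Spec_solution answers (solution answers)

-- ===== LEMMAS AND PROOFS =====

-- the per-pattern match count A accumulates (proof-side abbreviation)
def pvCnt (p : List Int) (n : Int) (answers : List Int) (k : Int) : Int :=
  ((PySem.List.enumerate answers k).map
    (fun ia => if ia.2 = PySem.List.pyGetD p (PySem.Int.mod ia.1 n) 0
               then (1 : Int) else 0)).sum

-- A's interleaved fold equals the three independent per-pattern counts
theorem pvFold_eq_cnt (answers : List Int) (k : Int) (s : Int × Int × Int) :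
    (PySem.List.enumerate answers k).foldl
      (fun (s : Int × Int × Int) ia =>
        let s := if ia.2 = PySem.List.pyGetD [1,2,3,4,5] (PySem.Int.mod ia.1 5) 0 then
                   (s.1 + 1, s.2.1, s.2.2) else s
        let s := if ia.2 = PySem.List.pyGetD [2,1,2,3,2,4,2,5] (PySem.Int.mod ia.1 8) 0 then
                   (s.1, s.2.1 + 1, s.2.2) else s
        if ia.2 = PySem.List.pyGetD [3,3,1,1,2,2,4,4,5,5] (PySem.Int.mod ia.1 10) 0 then
          (s.1, s.2.1, s.2.2 + 1) else s)
      s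
    = (s.1 + pvCnt [1,2,3,4,5] 5 answers k,
       s.2.1 + pvCnt [2,1,2,3,2,4,2,5] 8 answers k,
       s.2.2 + pvCnt [3,3,1,1,2,2,4,4,5,5] 10 answers k) := by
  induction answers generalizing k s with
  | nil => simp [pvCnt, PySem.List.enumerate_nil]
  | cons x xs ih =>
    rw [PySem.List.enumerate_cons]
    simp only [List.foldl_cons, List.map_cons, List.sum_cons, pvCnt,
      PySem.List.enumerate_cons] at *
    rw [ih]
    split_ifs <;> simp [Prod.ext_iff] <;> omega

-- a 0/1 pair-indicator sum over a list not containing the first component is 0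
theorem pvIndSum_notMem (R : List Int) (a x : Int) (g : Int → Int) (h : a ∉ R) :
    (R.map (fun r => if ((r, g r) : Int × Int) = (a, x) then (1 : Int) else 0)).sum = 0 := by
  induction R with
  | nil => simp
  | cons r R' ih =>
    simp only [List.mem_cons, not_or] at h
    have hne : ((r, g r) : Int × Int) ≠ (a, x) := by
      intro he; exact h.1 (congrArg Prod.fst he).symm
    rw [List.map_cons, List.sum_cons, if_neg hne, zero_add, ih h.2]

-- a 0/1 pair-indicator sum over a Nodup list containing a picks out the a-term
theorem pvIndSum_mem (R : List Int) (a x : Int) (g : Int → Int)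
    (hnd : R.Nodup) (h : a ∈ R) :
    (R.map (fun r => if ((r, g r) : Int × Int) = (a, x) then (1 : Int) else 0)).sum
    = if x = g a then 1 else 0 := by
  induction R with
  | nil => simp at h
  | cons r R' ih =>
    simp only [List.nodup_cons] at hnd
    rcases List.mem_cons.mp h with h1 | h1
    · subst h1
      rw [List.map_cons, List.sum_cons, pvIndSum_notMem R' a x g hnd.1, add_zero]
      by_cases hx : x = g a
      · rw [if_pos (by rw [hx]), if_pos hx]
      · rw [if_neg (by intro he; exact hx (congrArg Prod.snd he).symm), if_neg hx]
    · have hne : ((r, g r) : Int × Int) ≠ (a, x) := by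
        intro he; exact hnd.1 ((show r = a from congrArg Prod.fst he) ▸ h1)
      rw [List.map_cons, List.sum_cons, if_neg hne, zero_add, ih hnd.2 h1]

-- mod 40 then mod n = mod n for the three pattern lengths (n ∣ 40)
theorem pvModMod (n : Int) (hn : 0 < n) (hdvd : n ∣ 40) (i : Int) :
    PySem.Int.mod (PySem.Int.mod i 40) n = PySem.Int.mod i n := by
  rw [PySem.Int.mod_eq_emod_of_pos (by norm_num : (0:Int) < 40),
      PySem.Int.mod_eq_emod_of_pos hn, PySem.Int.mod_eq_emod_of_pos hn,
      Int.emod_emod_of_dvd _ hdvd]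

-- the 40-bucket histogram sum for pattern p equals A's direct match count
theorem pvBucket_eq_cnt (p : List Int) (n : Int) (hn : 0 < n) (hdvd : n ∣ 40)
    (answers : List Int) (k : Int) :
    ((PySem.List.pyRange 0 40 1).map
      (fun r => ((((PySem.List.enumerate answers k).map
                    (fun ia => ((PySem.Int.mod ia.1 40, ia.2) : Int × Int))).count
                  (r, PySem.List.pyGetD p (PySem.Int.mod r n) 0) : Nat) : Int))).sum
    = pvCnt p n answers k := by
  induction answers generalizing k with
  | nil => simp [pvCnt, PySem.List.enumerate_nil, List.sum_eq_zero]
  | cons x xs ih =>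
    have ha : PySem.Int.mod k 40 ∈ PySem.List.pyRange 0 40 1 := by
      rw [PySem.List.mem_pyRange_one]
      exact ⟨PySem.Int.mod_nonneg k (by norm_num), PySem.Int.mod_lt k (by norm_num)⟩
    have hcnt : ∀ r : Int,
        ((((PySem.List.enumerate (x :: xs) k).map
            (fun ia => ((PySem.Int.mod ia.1 40, ia.2) : Int × Int))).count
          (r, PySem.List.pyGetD p (PySem.Int.mod r n) 0) : Nat) : Int)
        = ((((PySem.List.enumerate xs (k+1)).map
            (fun ia => ((PySem.Int.mod ia.1 40, ia.2) : Int × Int))).count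
          (r, PySem.List.pyGetD p (PySem.Int.mod r n) 0) : Nat) : Int)
          + (if ((r, PySem.List.pyGetD p (PySem.Int.mod r n) 0) : Int × Int)
               = (PySem.Int.mod k 40, x) then (1 : Int) else 0) := by
      intro r
      rw [PySem.List.enumerate_cons, List.map_cons, List.count_cons]
      push_cast
      congr 1
      simp only [beq_iff_eq]
      exact if_congr eq_comm rfl rfl
    calc ((PySem.List.pyRange 0 40 1).map _).sum
        = ((PySem.List.pyRange 0 40 1).map
            (fun r => ((((PySem.List.enumerate xs (k+1)).map
                (fun ia => ((PySem.Int.mod ia.1 40, ia.2) : Int × Int))).count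
              (r, PySem.List.pyGetD p (PySem.Int.mod r n) 0) : Nat) : Int))).sum
          + ((PySem.List.pyRange 0 40 1).map
            (fun r => if ((r, PySem.List.pyGetD p (PySem.Int.mod r n) 0) : Int × Int)
               = (PySem.Int.mod k 40, x) then (1 : Int) else 0)).sum := by
          rw [← PySem.List.sum_map_add_int]
          exact congrArg List.sum (List.map_congr_left (fun r _ => hcnt r))
      _ = pvCnt p n (x :: xs) k := by
          rw [ih (k+1),
              pvIndSum_mem _ _ _ (fun r => PySem.List.pyGetD p (PySem.Int.mod r n) 0)
                (PySem.List.nodup_pyRange_one 0 40) ha,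
              pvModMod n hn hdvd k]
          simp only [pvCnt, PySem.List.enumerate_cons, List.map_cons, List.sum_cons]
          omega

-- B's histogram lookup is a count of the key in the mapped enumeration
theorem pvHist_getD (answers : List Int) (v : Int × Int) :
    (((PySem.List.enumerate answers 0).foldl
        (fun (d : PySem.Dict (Int × Int) Int) ia =>
          d.insert (PySem.Int.mod ia.1 40, ia.2)
            (d.getD (PySem.Int.mod ia.1 40, ia.2) 0 + 1))
        PySem.Dict.empty).getD v 0)
    = (((PySem.List.enumerate answers 0).map
        (fun ia => ((PySem.Int.mod ia.1 40, ia.2) : Int × Int))).count v : Int) := by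
  rw [show ((PySem.List.enumerate answers 0).foldl
        (fun (d : PySem.Dict (Int × Int) Int) ia =>
          d.insert (PySem.Int.mod ia.1 40, ia.2)
            (d.getD (PySem.Int.mod ia.1 40, ia.2) 0 + 1))
        PySem.Dict.empty)
      = (((PySem.List.enumerate answers 0).map
          (fun ia => ((PySem.Int.mod ia.1 40, ia.2) : Int × Int))).foldl
          (fun (d : PySem.Dict (Int × Int) Int) x => d.insert x (d.getD x 0 + 1))
          PySem.Dict.empty) from by rw [List.foldl_map]]
  rw [PySem.Dict.getD_foldl_insert_add_one]
  simp [PySem.Dict.getD_empty]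

-- one pattern's histogram table sum equals A's direct match count
theorem pvScore (p : List Int) (n : Int) (hn : 0 < n) (hdvd : n ∣ 40) (answers : List Int) :
    ((PySem.List.pyRange 0 40 1).map
      (fun r => ((PySem.List.enumerate answers 0).foldl
          (fun (d : PySem.Dict (Int × Int) Int) ia =>
            d.insert (PySem.Int.mod ia.1 40, ia.2)
              (d.getD (PySem.Int.mod ia.1 40, ia.2) 0 + 1))
          PySem.Dict.empty).getD (r, PySem.List.pyGetD p (PySem.Int.mod r n) 0) 0)).sum
    = pvCnt p n answers 0 := by
  rw [List.map_congr_left (l := PySem.List.pyRange 0 40 1)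
    (fun r _ => pvHist_getD answers (r, PySem.List.pyGetD p (PySem.Int.mod r n) 0))]
  exact pvBucket_eq_cnt p n hn hdvd answers 0

-- A's append-fold over the 3 scores with max(scores) equals B's filterMap with m
theorem pvFinal (c1 c2 c3 : Int) :
    (PySem.List.enumerate [c1, c2, c3] 0).foldl
      (fun (acc : List Int) ix =>
        if some ix.2 = PySem.List.max? [c1, c2, c3] (fun x => x) then acc ++ [ix.1 + 1] else acc)
      []
    = (PySem.List.enumerate [c1, c2, c3] 0).filterMap
        (fun ix => if ix.2 = (PySem.List.max? [c1, c2, c3] (fun x => x)).getD 0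
                   then some (ix.1 + 1) else none) := by
  obtain ⟨m, hm⟩ : ∃ m, PySem.List.max? [c1, c2, c3] (fun x => x) = some m := by
    rcases Option.eq_none_or_eq_some (PySem.List.max? [c1, c2, c3] (fun x => x)) with h | h
    · exact absurd ((PySem.List.max?_eq_none_iff _ _).mp h) (by simp)
    · exact h
  simp only [PySem.List.enumerate_cons, PySem.List.enumerate_nil, List.foldl_cons,
    List.foldl_nil, List.filterMap_cons, hm, Option.getD_some, Option.some.injEq]
  split_ifs <;> simp

theorem solution_eq_alt (answers : List Int) : solution answers = solution_alt answers := by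
  simp only [solution, solution_alt, List.map_cons, List.map_nil,
    List.length_cons, List.length_nil]
  rw [pvFold_eq_cnt]
  simp only [zero_add, Nat.reduceAdd, Nat.cast_ofNat]
  rw [pvScore [1,2,3,4,5] 5 (by norm_num) (by norm_num) answers,
      pvScore [2,1,2,3,2,4,2,5] 8 (by norm_num) (by norm_num) answers,
      pvScore [3,3,1,1,2,2,4,4,5,5] 10 (by norm_num) (by norm_num) answers]
  exact pvFinal _ _ _

-- ===== VERDICT (by name: the statement is the Claim_ definition above) =====
theorem solution_spec : Claim_equal_solution := by
  intro answers _
  unfold Spec_solution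
  exact solution_eq_alt answers
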